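-- pv_equiv track=rewrite | github.com/MarianoChun/Cancionero-TP-IP | funcionesVACIAS.py | artista
-- ===== SOURCE A (Python) =====
-- def artista(listaArtistas):
--     nombreArtista = ""
--     listaArtistasNueva = []
--     for linea in listaArtistas:
--         for letra in linea:
--             if letra != ";":
--                 nombreArtista = nombreArtista + letra
--             else:
--                 listaArtistasNueva.append(nombreArtista)
--                 nombreArtista = ""
--     return listaArtistasNueva
-- ===== SOURCE B (Python) =====
-- def artista(listaArtistas):
--     return "".join(listaArtistas).split(";")[:-1]
-- ===== Notes on version B (the rewrite author's own statement) =====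
-- stated objective: simpler
-- what changed: Replaces the nested char-by-char loop with a cross-line string accumulator by joining all lines into one string, splitting on ';' and dropping the last segment with [:-1].
import Mathlib
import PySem

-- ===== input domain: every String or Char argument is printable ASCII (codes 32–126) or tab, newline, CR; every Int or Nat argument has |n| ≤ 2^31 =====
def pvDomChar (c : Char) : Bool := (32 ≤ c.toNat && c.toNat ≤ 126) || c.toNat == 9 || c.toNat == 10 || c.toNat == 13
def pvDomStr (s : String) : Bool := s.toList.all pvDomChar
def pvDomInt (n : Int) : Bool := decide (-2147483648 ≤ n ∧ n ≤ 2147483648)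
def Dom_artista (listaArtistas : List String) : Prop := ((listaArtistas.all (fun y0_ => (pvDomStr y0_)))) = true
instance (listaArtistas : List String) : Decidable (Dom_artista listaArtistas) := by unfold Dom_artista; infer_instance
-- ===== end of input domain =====

-- B replaces A's nested char-by-char scan with join + split(';') + drop-last ([:-1]); objective: simpler.

-- ===== PORT A =====
-- the accumulated Python string nombreArtista is carried as a List Char (PySem's string representation)
def artista (listaArtistas : List String) : List String :=
  (listaArtistas.foldl
    (fun (st : List Char × List String) linea =>
      linea.toList.foldl
        (fun (st : List Char × List String) letra =>
          if letra ≠ ';' then (st.1 ++ [letra], st.2)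
          else ([], st.2 ++ [String.ofList st.1]))
        st)
    ([], [])).2

-- ===== PORT B =====
-- "".join(listaArtistas).split(";")[:-1]; split(';') with non-empty sep is PySem.Chars.splitOn, [:-1] is PySem.List.slice
def artista_alt (listaArtistas : List String) : List String :=
  PySem.List.slice
    ((PySem.Chars.splitOn (PySem.Str.join "" listaArtistas).toList [';']).map String.ofList)
    none (some (-1))

-- ===== PRECONDITION & SPEC =====
def Spec_artista (listaArtistas : List String) (out : List String) : Prop := out = artista_alt listaArtistas
instance (listaArtistas : List String) (out : List String) : Decidable (Spec_artista listaArtistas out) := by unfold Spec_artista; infer_instance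

-- ===== CLAIM (what is proved, stated in full; the proofs are below) =====
def Claim_equal_artista : Prop := ∀ (listaArtistas : List String), Dom_artista listaArtistas → Spec_artista listaArtistas (artista listaArtistas)

-- ===== LEMMAS AND PROOFS =====

-- prepend a prefix onto the head segment (total: on [] it makes the single segment)
def consHead (p : List Char) : List (List Char) → List (List Char)
  | [] => [p]
  | h :: t => (p ++ h) :: t

-- reference semantics of split on the single-char separator ';'
def mySplit : List Char → List (List Char)
  | [] => [[]]
  | c :: r => if c = ';' then [] :: mySplit r else consHead [c] (mySplit r)

theorem mySplit_ne_nil (cs : List Char) : mySplit cs ≠ [] := by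
  cases cs with
  | nil => simp [mySplit]
  | cons c r => by_cases h : c = ';' <;> simp [mySplit, h]; cases mySplit r <;> simp [consHead]

theorem consHead_nil_of_ne (m : List (List Char)) (h : m ≠ []) : consHead [] m = m := by
  cases m with
  | nil => exact absurd rfl h
  | cons a t => simp [consHead]

theorem consHead_consHead (a b : List Char) (m : List (List Char)) :
    consHead a (consHead b m) = consHead (a ++ b) m := by
  cases m <;> simp [consHead]

theorem go_eq_mySplit (l : List Char) : ∀ (fuel : Nat) (cur : List Char) (acc : List (List Char)),
    l.length ≤ fuel →
    PySem.Chars.splitOn.go [';'] fuel l cur acc = acc.reverse ++ consHead cur.reverse (mySplit l) := by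
  induction l with
  | nil =>
    intro fuel cur acc _
    cases fuel <;> rw [PySem.Chars.splitOn.go] <;> simp [mySplit, consHead]
  | cons c rest ih =>
    intro fuel cur acc hlen
    cases fuel with
    | zero => simp at hlen
    | succ f =>
      rw [PySem.Chars.splitOn.go]
      by_cases hc : c = ';'
      · subst hc
        have hpre : [';'].isPrefixOf (';' :: rest) = true := by simp [List.isPrefixOf]
        rw [if_pos hpre]
        simp only [List.length_cons, List.length_nil, Nat.zero_add, List.drop_succ_cons,
          List.drop_zero]
        rw [ih f [] (cur.reverse :: acc) (by simpa using Nat.le_of_succ_le_succ hlen)]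
        simp only [List.reverse_nil]
        rw [consHead_nil_of_ne _ (mySplit_ne_nil rest)]
        simp [mySplit, consHead]
      · have hpre : [';'].isPrefixOf (c :: rest) = false := by
          simp [List.isPrefixOf]; exact fun h => hc h.symm
        rw [if_neg (by simp [hpre])]
        rw [ih f (c :: cur) acc (by simpa using Nat.le_of_succ_le_succ hlen)]
        simp [mySplit, hc, consHead_consHead]

theorem splitOn_eq_mySplit (cs : List Char) : PySem.Chars.splitOn cs [';'] = mySplit cs := by
  rw [PySem.Chars.splitOn, go_eq_mySplit cs (cs.length + 1) [] [] (by omega)]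
  simp [consHead_nil_of_ne _ (mySplit_ne_nil cs)]

-- the character step of A's inner loop, by characterisation of the whole fold
theorem charFold_spec (cs : List Char) : ∀ (acc : List Char) (res : List String),
    cs.foldl
      (fun (st : List Char × List String) letra =>
        if letra ≠ ';' then (st.1 ++ [letra], st.2)
        else ([], st.2 ++ [String.ofList st.1]))
      (acc, res)
    = ((consHead acc (mySplit cs)).getLastD [],
       res ++ ((consHead acc (mySplit cs)).dropLast).map String.ofList) := by
  induction cs with
  | nil => intro acc res; simp [mySplit, consHead]
  | cons c rest ih =>
    intro acc res
    by_cases hc : c = ';'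
    · simp only [List.foldl_cons, hc, ne_eq, not_true_eq_false, if_false]
      rw [ih [] (res ++ [String.ofList acc])]
      rw [consHead_nil_of_ne _ (mySplit_ne_nil rest)]
      have hne := mySplit_ne_nil rest
      simp [mySplit, consHead]
      constructor
      · cases h : mySplit rest with
        | nil => exact absurd h hne
        | cons a t => simp
      · rw [List.dropLast_cons_of_ne_nil (by simp [hne])]
    · simp only [List.foldl_cons, hc, ne_eq, not_false_eq_true, if_true]
      rw [ih (acc ++ [c]) res]
      simp [mySplit, hc, consHead_consHead]

theorem outer_eq_flat (lines : List String) : ∀ (st : List Char × List String),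
    lines.foldl
      (fun st linea =>
        linea.toList.foldl
          (fun (st : List Char × List String) letra =>
            if letra ≠ ';' then (st.1 ++ [letra], st.2)
            else ([], st.2 ++ [String.ofList st.1]))
          st)
      st
    = ((lines.map String.toList).flatten).foldl
        (fun (st : List Char × List String) letra =>
          if letra ≠ ';' then (st.1 ++ [letra], st.2)
          else ([], st.2 ++ [String.ofList st.1]))
        st := by
  induction lines with
  | nil => intro st; simp
  | cons x xs ih =>
    intro st
    simp only [List.foldl_cons, List.map_cons, List.flatten_cons, List.foldl_append]
    exact ih _

theorem intercalate_nil_eq_flatten (xss : List (List Char)) :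
    ([] : List Char).intercalate xss = xss.flatten := by
  simp [List.intercalate]
  induction xss with
  | nil => simp
  | cons a t ih => cases t <;> simp_all [List.intersperse]

theorem slice_neg_one_eq_dropLast (xs : List String) :
    PySem.List.slice xs none (some (-1)) = xs.dropLast := by
  simp [PySem.List.slice, List.dropLast_eq_take]

-- ===== VERDICT (by name: the statement is the Claim_ definition above) =====
theorem artista_spec : Claim_equal_artista := by
  intro l _
  unfold Spec_artista artista artista_alt
  rw [outer_eq_flat, charFold_spec, slice_neg_one_eq_dropLast]
  rw [PySem.Str.toList_join]
  rw [show PySem.Chars.join "".toList (l.map String.toList) = (l.map String.toList).flatten from by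
    simp [PySem.Chars.join, intercalate_nil_eq_flatten]]
  rw [consHead_nil_of_ne _ (mySplit_ne_nil _), splitOn_eq_mySplit]
  simp [List.map_dropLast]
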